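-- pv_equiv track=rewrite | github.com/miliar/Code_Jam_Webscraper | solutions_python/Problem_155/1685.py | solve
-- ===== SOURCE A (Python) =====
-- def solve(l):
-- 	k,s = 0,0
-- 	for i,x in enumerate(l):
-- 		if x>0:
-- 			s += max(i-k,0)
-- 			k += max(i-k,0)
-- 		k += x
-- 	return s
-- ===== SOURCE B (Python) =====
-- def solve(l):
--     # Closed form: the answer is the largest "position deficit" i - (l[0]+...+l[i-1])
--     # over positive entries l[i], floored at 0.  Stage 1 builds the prefix sums,
--     # stage 2 takes the max of the deficits; no coupled running accumulators.
--     pre = [0]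
--     for x in l:
--         pre.append(pre[-1] + x)
--     return max([0] + [i - pre[i] for i, x in enumerate(l) if x > 0])
-- ===== Notes on version B (the rewrite author's own statement) =====
-- stated objective: alternative
-- what changed: B replaces A's coupled running accumulators (k,s) with a closed-form characterization: it builds the prefix-sum list in one pass and then returns the maximum of the deficits i - prefix[i] over positive entries (floored at 0), in two staged passes instead of A's incremental bumping.
import Mathlib
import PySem

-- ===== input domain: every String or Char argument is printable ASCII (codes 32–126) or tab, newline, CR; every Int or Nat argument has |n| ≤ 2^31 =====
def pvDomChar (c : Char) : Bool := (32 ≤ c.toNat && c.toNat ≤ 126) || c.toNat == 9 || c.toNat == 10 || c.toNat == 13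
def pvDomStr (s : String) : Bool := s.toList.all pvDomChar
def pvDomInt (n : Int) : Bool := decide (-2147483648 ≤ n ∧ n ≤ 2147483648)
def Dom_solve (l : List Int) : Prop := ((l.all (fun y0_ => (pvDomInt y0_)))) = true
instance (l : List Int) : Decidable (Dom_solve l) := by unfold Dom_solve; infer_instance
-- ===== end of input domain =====

-- B replaces A's coupled running accumulators by a closed-form characterization:
-- the answer is the maximum prefix deficit i - (l[0]+...+l[i-1]) over positive entries,
-- computed in two staged passes (prefix sums, then a max); same O(n) cost, different algorithm.

-- ===== PORT A =====
def solveLoopA : List Int → Int → Int → Int → Int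
  | [], _, _, s => s
  | x :: xs, i, k, s =>
    if x > 0 then
      solveLoopA xs (i + 1) (k + max (i - k) 0 + x) (s + max (i - k) 0)
    else
      solveLoopA xs (i + 1) (k + x) s

def solve (l : List Int) : Int := solveLoopA l 0 0 0

-- ===== PORT B =====
-- pre[-1] is PySem.List.pyGetD pre (-1) 0 (pre is always nonempty); pre[i] with the
-- nonnegative in-range enumerate index i is PySem.List.pyGetD pre i 0.
def solve_alt (l : List Int) : Int :=
  (((PySem.List.enumerate l).filter (fun q => q.2 > 0)).map
      (fun q => q.1 - PySem.List.pyGetD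
        (l.foldl (fun acc x => acc ++ [PySem.List.pyGetD acc (-1) 0 + x]) [0]) q.1 0)).foldl max 0

-- ===== PRECONDITION & SPEC =====
def Spec_solve (l : List Int) (out : Int) : Prop := out = solve_alt l
instance (l : List Int) (out : Int) : Decidable (Spec_solve l out) := by unfold Spec_solve; infer_instance

-- ===== CLAIM (what is proved, stated in full; the proofs are below) =====
def Claim_equal_solve : Prop := ∀ (l : List Int), Dom_solve l → Spec_solve l (solve l)

-- ===== LEMMAS AND PROOFS =====

-- the list of position deficits at positive entries, from index i with prefix sum p
def defsL : List Int → Int → Int → List Int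
  | [], _, _ => []
  | x :: xs, i, p => (if x > 0 then [i - p] else []) ++ defsL xs (i + 1) (p + x)

-- running prefix sums (the tail of B's `pre`)
def scanS : List Int → Int → List Int
  | [], _ => []
  | x :: xs, p => (p + x) :: scanS xs (p + x)

theorem loopA_eq_foldl_max : ∀ (xs : List Int) (i p s : Int),
    solveLoopA xs i (p + s) s = (defsL xs i p).foldl max s := by
  intro xs
  induction xs with
  | nil => intro i p s; simp [solveLoopA, defsL]
  | cons x xs ih =>
    intro i p s
    simp only [solveLoopA, defsL]
    by_cases hx : x > 0
    · rw [if_pos hx, if_pos hx]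
      have h1 : p + s + max (i - (p + s)) 0 + x = (p + x) + (s + max (i - (p + s)) 0) := by ring
      have h2 : s + max (i - (p + s)) 0 = max s (i - p) := by omega
      rw [h1, h2, ih]
      simp [List.foldl_cons]
    · rw [if_neg hx, if_neg hx]
      have h1 : p + s + x = (p + x) + s := by ring
      rw [h1, ih]
      simp

theorem pre_build : ∀ (xs : List Int) (acc : List Int) (p : Int),
    PySem.List.pyGetD acc (-1) 0 = p →
    xs.foldl (fun acc x => acc ++ [PySem.List.pyGetD acc (-1) 0 + x]) acc = acc ++ scanS xs p := by
  intro xs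
  induction xs with
  | nil => intro acc p _; simp [scanS]
  | cons x xs ih =>
    intro acc p hp
    simp only [List.foldl_cons, scanS]
    rw [hp, ih (acc ++ [p + x]) (p + x) (PySem.List.pyGetD_neg_one_append_singleton acc (p + x) 0)]
    simp

theorem getD_scan : ∀ (xs : List Int) (p : Int) (k : Nat), k ≤ xs.length →
    (p :: scanS xs p).getD k 0 = p + (xs.take k).sum := by
  intro xs
  induction xs with
  | nil =>
    intro p k hk
    have : k = 0 := Nat.le_zero.mp hk
    subst this; simp
  | cons x xs ih =>
    intro p k hk
    cases k with
    | zero => simp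
    | succ k =>
      simp only [scanS, List.getD_cons_succ, List.take_succ_cons, List.sum_cons]
      rw [ih (p + x) k (by simpa using hk)]
      ring

theorem cands_eq_defsL : ∀ (xs : List Int) (j p : Int) (g : Int → Int),
    (∀ (t : Nat), t < xs.length → g (j + t) = p + (xs.take t).sum) →
    ((PySem.List.enumerate xs j).filter (fun q => q.2 > 0)).map (fun q => q.1 - g q.1)
      = defsL xs j p := by
  intro xs
  induction xs with
  | nil => intro j p g _; simp [PySem.List.enumerate_nil, defsL]
  | cons x xs ih =>
    intro j p g hg
    have hj : g j = p := by
      have := hg 0 (by simp)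
      simpa using this
    have hstep : ∀ (t : Nat), t < xs.length → g ((j + 1) + t) = (p + x) + (xs.take t).sum := by
      intro t ht
      have := hg (t + 1) (by simpa using Nat.succ_lt_succ ht)
      have harg : j + ((t : Int) + 1) = (j + 1) + t := by ring
      simpa [harg, add_assoc] using this
    simp only [PySem.List.enumerate_cons, List.filter_cons, defsL]
    by_cases hx : x > 0
    · rw [if_pos (by simpa using hx), if_pos hx]
      simp only [List.map_cons, hj, List.singleton_append]
      rw [ih (j + 1) (p + x) g hstep]
    · rw [if_neg (by simpa using hx), if_neg hx]
      exact ih (j + 1) (p + x) g hstep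

theorem alt_eq_foldl_max (l : List Int) :
    solve_alt l = (defsL l 0 0).foldl max 0 := by
  unfold solve_alt
  rw [pre_build l [0] 0 (by decide)]
  have hpre : ([0] ++ scanS l 0 : List Int) = (0 : Int) :: scanS l 0 := by simp
  rw [hpre]
  rw [cands_eq_defsL l 0 0 (fun i => PySem.List.pyGetD ((0 : Int) :: scanS l 0) i 0) ?_]
  intro t ht
  have : ((0 : Int) + (t : Int)) = ((t : Nat) : Int) := by ring
  rw [this]
  simp only [PySem.List.pyGetD_natCast]
  rw [getD_scan l 0 t (le_of_lt ht)]

-- ===== VERDICT (by name: the statement is the Claim_ definition above) =====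
theorem solve_spec : Claim_equal_solve := by
  intro l _
  unfold Spec_solve solve
  rw [alt_eq_foldl_max]
  have := loopA_eq_foldl_max l 0 0 0
  simpa using this
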